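-- pv_equiv track=rewrite | github.com/nesram5/toolkit_netcom | older versions/bak/WIP_Find_IP_Managment.py | command_mk_find_ip_management
-- ===== SOURCE A (Python) =====
-- def command_mk_find_ip_management(segment):
--
--     command = []
--     i = 0
--
--     if '.' in segment:
--         result = segment.split(".")
--         segment = int(result[1])
--         while i < 4:
--             segment = segment + i
--             command.append('ip route print terse without-paging where gateway~"10.10.{}"'.format(segment))
--             i += 1
--     else:
--         segment = int(segment)
--         while i < 4:
--             segment = segment + i
--             command.append('ip route print terse without-paging where gateway~"10.1.{}"'.format(segment))
--             i += 1
--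
--     return command
-- ===== SOURCE B (Python) =====
-- def command_mk_find_ip_management(segment):
--     if '.' in segment:
--         base = int(segment.split('.')[1])
--         template = 'ip route print terse without-paging where gateway~"10.10.{}"'
--     else:
--         base = int(segment)
--         template = 'ip route print terse without-paging where gateway~"10.1.{}"'
--     return [template.format(base + i * (i + 1) // 2) for i in range(4)]
-- ===== Notes on version B (the rewrite author's own statement) =====
-- stated objective: simpler
-- what changed: B selects the base number and the prefix once and builds the four commands by a comprehension with the closed-form triangular offset base + i*(i+1)//2, replacing A's duplicated while-loops with a running accumulator.
import Mathlib
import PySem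

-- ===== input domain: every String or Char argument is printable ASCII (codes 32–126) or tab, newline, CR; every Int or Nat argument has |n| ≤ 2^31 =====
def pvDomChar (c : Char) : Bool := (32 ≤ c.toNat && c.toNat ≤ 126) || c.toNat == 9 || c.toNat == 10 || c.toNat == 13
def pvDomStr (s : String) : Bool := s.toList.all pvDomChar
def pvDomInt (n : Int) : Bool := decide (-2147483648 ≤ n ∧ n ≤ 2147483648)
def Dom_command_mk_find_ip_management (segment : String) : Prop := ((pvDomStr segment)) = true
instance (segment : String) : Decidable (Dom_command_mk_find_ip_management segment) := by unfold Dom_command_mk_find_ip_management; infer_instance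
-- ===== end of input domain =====

-- B selects the base and prefix once and maps a closed-form triangular offset; one honest line: simpler, same O(1) cost.

-- ===== PORT A =====
-- A's while loop: i goes 0..3, segment is the running accumulator, command grows at the back.
def command_mk_find_ip_management (segment : String) : List String :=
  if PySem.Str.isIn "." segment then
    let result := ((PySem.Str.split? segment ".").getD [])
    match PySem.List.pyGet? result 1 with
    | none => []          -- unreachable: '.' in segment gives ≥ 2 parts
    | some r =>
      match PySem.Int.ofStr? r with
      | none => []        -- int() raises ValueError: excluded by Pre_
      | some seg0 =>
        ((PySem.List.pyRange 0 4 1).foldl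
          (fun (st : Int × List String) i =>
            let seg := st.1 + i
            (seg, st.2 ++ [PySem.Str.join "" ["ip route print terse without-paging where gateway~\"10.10.", PySem.Int.toStr seg, "\""]]))
          (seg0, [])).2
  else
    match PySem.Int.ofStr? segment with
    | none => []          -- int() raises ValueError: excluded by Pre_
    | some seg0 =>
      ((PySem.List.pyRange 0 4 1).foldl
        (fun (st : Int × List String) i =>
          let seg := st.1 + i
          (seg, st.2 ++ [PySem.Str.join "" ["ip route print terse without-paging where gateway~\"10.1.", PySem.Int.toStr seg, "\""]]))
        (seg0, [])).2

-- ===== PORT B =====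
def command_mk_find_ip_management_alt (segment : String) : List String :=
  let (base?, pre) :=
    if PySem.Str.isIn "." segment then
      (PySem.Int.ofStr? (((((PySem.Str.split? segment ".").getD [])).getD 1 "")),
       "ip route print terse without-paging where gateway~\"10.10.")
    else
      (PySem.Int.ofStr? segment,
       "ip route print terse without-paging where gateway~\"10.1.")
  match base? with
  | none => []            -- int() raises ValueError: excluded by Pre_
  | some base =>
    (PySem.List.pyRange 0 4 1).map
      (fun i => PySem.Str.join "" [pre, PySem.Int.toStr (base + PySem.Int.floordiv (i * (i + 1)) 2), "\""])

-- ===== PRECONDITION & SPEC =====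
-- Pre_ excludes exactly the inputs on which int() raises ValueError in A (and in B): the relevant
-- piece (the part after the first '.', or the whole string) must parse as a Python int.
def Pre_command_mk_find_ip_management (segment : String) : Prop :=
  (if PySem.Str.isIn "." segment then
     (PySem.List.pyGet? (((PySem.Str.split? segment ".").getD [])) 1).bind PySem.Int.ofStr?
   else PySem.Int.ofStr? segment).isSome = true
instance (segment : String) : Decidable (Pre_command_mk_find_ip_management segment) := by
  unfold Pre_command_mk_find_ip_management; infer_instance
def pvWitness_command_mk_find_ip_management : String := "1.2.3"
def Spec_command_mk_find_ip_management (segment : String) (out : List String) : Prop := out = command_mk_find_ip_management_alt segment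
instance (segment : String) (out : List String) : Decidable (Spec_command_mk_find_ip_management segment out) := by unfold Spec_command_mk_find_ip_management; infer_instance

-- ===== CLAIM (what is proved, stated in full; the proofs are below) =====
def Claim_equal_command_mk_find_ip_management : Prop := ∀ (segment : String), Dom_command_mk_find_ip_management segment → Pre_command_mk_find_ip_management segment → Spec_command_mk_find_ip_management segment (command_mk_find_ip_management segment)

-- ===== LEMMAS AND PROOFS =====

theorem command_mk_find_ip_management_spec : Claim_equal_command_mk_find_ip_management := by
  intro segment _ hpre
  unfold Pre_command_mk_find_ip_management at hpre
  unfold Spec_command_mk_find_ip_management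
  unfold command_mk_find_ip_management command_mk_find_ip_management_alt
  by_cases hdot : PySem.Str.isIn "." segment = true
  · simp only [hdot, if_pos] at hpre ⊢
    cases hg : PySem.List.pyGet? ((PySem.Str.split? segment ".").getD []) 1 with
    | none => simp [hg] at hpre
    | some r =>
      cases hb : PySem.Int.ofStr? r with
      | none => simp [hg, hb] at hpre
      | some base =>
        have hL : ((PySem.Str.split? segment ".").getD [])[(1 : Nat)]? = some r := by
          rw [show (1 : Int) = ((1 : Nat) : Int) from rfl, PySem.List.pyGet?_natCast] at hg
          exact hg
        have h4 : PySem.List.pyRange 0 4 1 = [0, 1, 2, 3] := by decide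
        have e1 : base + 1 + 2 = base + 3 := by ring
        have e2 : base + 3 + 3 = base + 6 := by ring
        simp [h4, hL, hb, PySem.Int.floordiv, e1, e2]
  · simp only [Bool.not_eq_true] at hdot
    simp only [hdot, Bool.false_eq_true, if_false] at hpre ⊢
    cases hb : PySem.Int.ofStr? segment with
    | none => simp [hb] at hpre
    | some base =>
      have h4 : PySem.List.pyRange 0 4 1 = [0, 1, 2, 3] := by decide
      have e1 : base + 1 + 2 = base + 3 := by ring
      have e2 : base + 3 + 3 = base + 6 := by ring
      simp [h4, PySem.Int.floordiv, e1, e2]
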